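-- pv_equiv track=rewrite | github.com/jorgecomacho/AoC2024 | Day07/day07.py | basify
-- ===== SOURCE A (Python) =====
-- def basify(num, base, pad):
--     nums = []
--     while num:
--         num, remainder = divmod(num, base)
--         nums.append(str(remainder))
--     tmp = ''.join(reversed(nums))
--     tmp = '0'*(pad-len(tmp))+tmp
--     return tmp
-- ===== SOURCE B (Python) =====
-- def basify(num, base, pad):
--     # high-to-low positional-weight traversal: count digits first, then emit
--     # each digit as num // base**i % base, most significant first (no reversal)
--     d = 0
--     p = 1
--     while p <= num:
--         p *= base
--         d += 1
--     s = ''.join(str(num // base ** i % base) for i in range(d - 1, -1, -1))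
--     return '0' * (pad - len(s)) + s
-- ===== Notes on version B (the rewrite author's own statement) =====
-- stated objective: alternative
-- what changed: Replaces A's destructive low-to-high divmod loop plus list reversal by first counting the digits with a running power and then reading each digit directly as num // base**i % base from the most significant position down, so no digit list and no reversal exist.
-- outside the precondition, e.g. on basify(3, -2, 0): A returns '-1-10-1', B returns '0-1'; on basify(-3, 2, 0): A does not finish within the time limit, B returns ''; on basify(3, 0, 0): A raises ZeroDivisionError, B does not finish within the time limit
import Mathlib
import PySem

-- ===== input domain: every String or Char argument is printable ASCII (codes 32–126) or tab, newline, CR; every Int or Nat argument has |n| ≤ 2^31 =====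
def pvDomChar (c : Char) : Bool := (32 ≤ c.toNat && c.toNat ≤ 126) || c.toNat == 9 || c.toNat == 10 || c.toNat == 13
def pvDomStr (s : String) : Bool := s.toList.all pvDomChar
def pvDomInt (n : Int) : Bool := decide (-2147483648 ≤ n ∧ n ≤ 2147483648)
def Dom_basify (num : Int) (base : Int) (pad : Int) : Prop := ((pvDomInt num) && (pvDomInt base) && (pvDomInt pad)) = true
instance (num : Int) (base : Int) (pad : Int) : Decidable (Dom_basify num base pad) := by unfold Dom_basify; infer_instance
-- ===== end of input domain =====

-- B replaces A's low-to-high divmod-and-reverse loop by a digit count followed by a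
-- direct high-to-low positional read num // base**i % base (objective: alternative).

-- ===== PORT A =====
-- while num: num, remainder = divmod(num, base); nums.append(str(remainder))
-- Fuel makes the while loop total; inside Pre_ num.natAbs + 1 iterations always suffice.
def basifyLoop (fuel : Nat) (num : Int) (base : Int) (nums : List (List Char)) : List (List Char) :=
  match fuel with
  | 0 => nums
  | f + 1 =>
    if num = 0 then nums
    else
      match PySem.Int.divmod? num base with
      | some qr => basifyLoop f qr.1 base (nums ++ [PySem.Int.toChars qr.2])
      | none => nums   -- ZeroDivisionError (base = 0 with num ≠ 0): excluded by Pre_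

def basify (num : Int) (base : Int) (pad : Int) : String :=
  let nums := basifyLoop (num.natAbs + 1) num base []
  let tmp := PySem.Chars.join [] nums.reverse          -- ''.join(reversed(nums))
  String.ofList (List.replicate (pad - (tmp.length : Int)).toNat '0' ++ tmp)
      -- '0'*(pad-len(tmp)) + tmp ; Python's negative repeat count gives '' = toNat's clamp

-- ===== PORT B =====
-- while p <= num: p *= base; d += 1   (digit count)
def countLoop (fuel : Nat) (p : Int) (num : Int) (base : Int) (d : Int) : Int × Int :=
  match fuel with
  | 0 => (p, d)
  | f + 1 => if p ≤ num then countLoop f (p * base) num base (d + 1) else (p, d)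

def basify_alt (num : Int) (base : Int) (pad : Int) : String :=
  let d := (countLoop (num.natAbs + 1) 1 num base 0).2
  -- ''.join(str(num // base ** i % base) for i in range(d-1, -1, -1)); i ≥ 0 on the
  -- whole range, so base ** i is base ^ i.toNat exactly
  let s := PySem.Chars.join []
    ((PySem.List.pyRange (d - 1) (-1) (-1)).map
      (fun i => PySem.Int.toChars (PySem.Int.mod (PySem.Int.floordiv num (base ^ i.toNat)) base)))
  String.ofList (List.replicate (pad - (s.length : Int)).toNat '0' ++ s)

-- ===== PRECONDITION & SPEC =====
-- Pre_ restricts to the natural domain of a base-conversion routine: outside it A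
-- diverges (num < 0, or base = 1 with num ≠ 0), raises ZeroDivisionError (base = 0 with
-- num ≠ 0), or for base ≤ -2 returns accidental concatenations of negative remainders
-- such as '-1-10-1' that are not base representations; num = 0 never enters the loop, so
-- any base is admitted there.
def Pre_basify (num : Int) (base : Int) (pad : Int) : Prop := 0 ≤ num ∧ (2 ≤ base ∨ num = 0)
instance (num : Int) (base : Int) (pad : Int) : Decidable (Pre_basify num base pad) := by unfold Pre_basify; infer_instance
def pvWitness_basify : Int × Int × Int := (5, 2, 4)

def Spec_basify (num : Int) (base : Int) (pad : Int) (out : String) : Prop := out = basify_alt num base pad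
instance (num : Int) (base : Int) (pad : Int) (out : String) : Decidable (Spec_basify num base pad out) := by unfold Spec_basify; infer_instance

-- ===== CLAIM (what is proved, stated in full; the proofs are below) =====
def Claim_equal_basify : Prop := ∀ (num : Int) (base : Int) (pad : Int), Dom_basify num base pad → Pre_basify num base pad → Spec_basify num base pad (basify num base pad)

-- ===== LEMMAS AND PROOFS =====

-- A's loop collects str(d) for the little-endian digits of num.
theorem basifyLoop_eq (b : Nat) (hb : 2 ≤ b) :
    ∀ (fuel n : Nat) (acc : List (List Char)), n < fuel →
    basifyLoop fuel (n : Int) (b : Int) acc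
      = acc ++ (Nat.digits b n).map (fun t : Nat => PySem.Int.toChars (t : Int)) := by
  intro fuel
  induction fuel with
  | zero => intro n acc h; omega
  | succ f ih =>
    intro n acc h
    by_cases hn : n = 0
    · subst hn; simp [basifyLoop]
    · have hb0 : (b : Int) ≠ 0 := by exact_mod_cast (by omega : b ≠ 0)
      have hne : (n : Int) ≠ 0 := by exact_mod_cast hn
      rw [basifyLoop, if_neg hne]
      simp only [PySem.Int.divmod?, if_neg hb0]
      have hq : (n : Int).fdiv (b : Int) = ((n / b : Nat) : Int) := by
        have := PySem.Int.floordiv_natCast n b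
        simpa [PySem.Int.floordiv] using this
      have hr : (n : Int).fmod (b : Int) = ((n % b : Nat) : Int) := by
        have := PySem.Int.mod_natCast n b
        simpa [PySem.Int.mod] using this
      rw [hq, hr, ih (n / b) _ (by
        have : n / b < n := Nat.div_lt_self (by omega) (by omega)
        omega)]
      rw [Nat.digits_def' (by omega : 1 < b) (by omega : 0 < n)]
      simp

-- B's counting loop computes the number of base-b digits of n.
theorem countLoop_eq (b n : Nat) (hb : 2 ≤ b) :
    ∀ (fuel k : Nat), n < b ^ (k + fuel) →
    (countLoop fuel ((b : Int) ^ k) (n : Int) (b : Int) (k : Int)).2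
      = ((max k (Nat.digits b n).length : Nat) : Int) := by
  intro fuel
  induction fuel with
  | zero =>
    intro k h
    have hlen : (Nat.digits b n).length ≤ k :=
      (Nat.digits_length_le_iff (by omega : 1 < b) n).mpr (by simpa using h)
    simp [countLoop, Nat.max_eq_left hlen]
  | succ f ih =>
    intro k h
    rw [countLoop]
    by_cases hle : ((b : Int) ^ k) ≤ (n : Int)
    · rw [if_pos hle]
      have hbk : b ^ k ≤ n := by exact_mod_cast hle
      have hlen : k < (Nat.digits b n).length := by
        by_contra hc
        have hlt : n < b ^ k :=
          (Nat.digits_length_le_iff (by omega : 1 < b) n).mp (Nat.le_of_not_lt hc)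
        omega
      have h1 : ((b : Int) ^ k) * (b : Int) = (b : Int) ^ (k + 1) := by ring
      have h2 : ((k : Int) + 1) = ((k + 1 : Nat) : Int) := by push_cast; ring
      rw [h1, h2, ih (k + 1) (by rw [show k + 1 + f = k + (f + 1) from by omega]; exact h)]
      congr 1
      omega
    · rw [if_neg hle]
      have hbk : n < b ^ k := by exact_mod_cast not_le.mp hle
      have hlen : (Nat.digits b n).length ≤ k :=
        (Nat.digits_length_le_iff (by omega : 1 < b) n).mpr hbk
      simp [Nat.max_eq_left hlen]

-- positional read of the i-th little-endian digit
theorem digit_read (b : Nat) (hb : 2 ≤ b) :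
    ∀ (i n : Nat), n / b ^ i % b = (Nat.digits b n).getD i 0 := by
  intro i
  induction i with
  | zero =>
    intro n
    by_cases hn : n = 0
    · simp [hn]
    · rw [Nat.digits_def' (by omega : 1 < b) (by omega : 0 < n)]
      simp
  | succ i ih =>
    intro n
    by_cases hn : n = 0
    · simp [hn, Nat.zero_div]
    · have h1 : n / b ^ (i + 1) = n / b / b ^ i := by
        rw [Nat.div_div_eq_div_mul, pow_succ, mul_comm (b ^ i) b]
      rw [h1, ih (n / b), Nat.digits_def' (by omega : 1 < b) (by omega : 0 < n)]
      simp

theorem map_range_getD {α : Type} (xs : List Nat) (g : Nat → α) :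
    (List.range xs.length).map (fun k => g (xs.getD k 0)) = xs.map g := by
  apply List.ext_getElem
  · simp
  · intro k h1 h2
    simp only [List.getElem_map, List.getElem_range]
    rw [List.getD_eq_getElem xs 0 (by simpa using h2)]

-- the digit list B emits equals A's reversed digit-string list
theorem blist_eq (b n : Nat) (hb : 2 ≤ b) :
    ((PySem.List.pyRange (((Nat.digits b n).length : Int) - 1) (-1) (-1)).map
      (fun i => PySem.Int.toChars
        (PySem.Int.mod (PySem.Int.floordiv (n : Int) ((b : Int) ^ i.toNat)) (b : Int))))
      = ((Nat.digits b n).map (fun t : Nat => PySem.Int.toChars (t : Int))).reverse := by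
  have h0 : (((Nat.digits b n).length : Int) - 1) + 1 = ((Nat.digits b n).length : Int) := by ring
  have e1 : (-1 : Int) + 1 = 0 := by ring
  rw [PySem.List.pyRange_neg_one_eq_reverse, h0, e1,
      PySem.List.pyRange_zero_nat (Nat.digits b n).length, List.map_reverse, List.map_map]
  congr 1
  rw [← map_range_getD (Nat.digits b n) (fun t : Nat => PySem.Int.toChars (t : Int))]
  apply List.map_congr_left
  intro k _
  simp only [Function.comp_apply]
  rw [← digit_read b hb k n]
  congr 1
  rw [Int.toNat_natCast k,
      show ((b : Int)) ^ k = ((b ^ k : Nat) : Int) from by push_cast; ring,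
      PySem.Int.floordiv_natCast, PySem.Int.mod_natCast]

-- ===== VERDICT (by name: the statement is the Claim_ definition above) =====
theorem basify_spec : Claim_equal_basify := by
  intro num base pad _ hpre
  obtain ⟨hnum, hbase⟩ := hpre
  unfold Spec_basify
  by_cases h0 : num = 0
  · subst h0
    simp [basify, basify_alt, basifyLoop, countLoop, PySem.List.pyRange_neg_one_eq_nil,
      PySem.Chars.join]
  · have hb2 : 2 ≤ base := by rcases hbase with h | h; exact h; exact absurd h h0
    obtain ⟨n, rfl⟩ : ∃ m : Nat, num = (m : Int) := ⟨num.toNat, (Int.toNat_of_nonneg hnum).symm⟩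
    obtain ⟨b, rfl⟩ : ∃ m : Nat, base = (m : Int) := ⟨base.toNat, (Int.toNat_of_nonneg (by omega)).symm⟩
    have hb : 2 ≤ b := by exact_mod_cast hb2
    have hnA : (n : Int).natAbs = n := Int.natAbs_natCast n
    have hloop := basifyLoop_eq b hb (n + 1) n [] (by omega)
    have hcount : (countLoop (n + 1) 1 (n : Int) (b : Int) 0).2
        = (((Nat.digits b n).length : Nat) : Int) := by
      have h1 : (1 : Int) = (b : Int) ^ (0 : Nat) := by norm_num
      have h2 : n < b ^ (0 + (n + 1)) := by
        calc n < 2 ^ (n + 1) := by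
                have := Nat.lt_two_pow_self (n := n); omega
          _ ≤ b ^ (n + 1) := Nat.pow_le_pow_left hb (n + 1)
          _ = b ^ (0 + (n + 1)) := by rw [Nat.zero_add]
      have := countLoop_eq b n hb (n + 1) 0 h2
      rw [h1]
      rw [show ((0 : Int)) = ((0 : Nat) : Int) from rfl, this]
      simp
    simp only [basify, basify_alt, hnA, hloop, hcount, blist_eq b n hb, List.nil_append]
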